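-- pv_equiv track=rewrite | github.com/Deltares/D-EcoImpact | decoimpact/data/dictionary_utils.py | convert_table_element
-- ===== SOURCE A (Python) =====
-- from typing import Any, Dict, List, Optional, TypeVar
--
-- def convert_table_element(table: List[Any]) -> Dict[Any, Any]:
--     """Convert a table element into a dictionary
--
--     Args:
--         table (list[Any]): Table to convert
--     Raises:
--         ValueError: When table is not correctly defined
--
--     Returns:
--         Dict[Any, Any]: readable dictionary with parsed headers and values.
--     """
--
--     if len(table) <= 1:
--         raise ValueError(
--             "Define a correct table with the headers in the first row and values in \
--             the others."
--         )
--
--     if not all(len(row) == len(table[0]) for row in table):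
--         raise ValueError("Make sure that all rows in the table have the same length.")
--
--     headers = table[0]
--
--     if len(headers) != len(set(headers)):
--         seen = set()
--         dupes = [x for x in headers if x in seen or seen.add(x)]
--         raise ValueError(
--             f"There should only be unique headers. Duplicate values: {dupes}"
--         )
--
--     values = list(map(list, zip(*table[1:])))  # transpose list
--     return dict(zip(headers, values))
-- ===== SOURCE B (Python) =====
-- from typing import Any, Dict, List
--
--
-- def convert_table_element(table: List[Any]) -> Dict[Any, Any]:
--     """Convert a table element into a dictionary (recursive head-column split)."""
--
--     if len(table) < 2:
--         raise ValueError(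
--             "Define a correct table with the headers in the first row and values in \
--             the others."
--         )
--
--     if len({len(row) for row in table}) > 1:
--         raise ValueError("Make sure that all rows in the table have the same length.")
--
--     headers = table[0]
--
--     dupes = [h for i, h in enumerate(headers) if h in headers[:i]]
--     if dupes:
--         raise ValueError(
--             f"There should only be unique headers. Duplicate values: {dupes}"
--         )
--
--     return _columns(headers, table[1:])
--
--
-- def _columns(headers, rows):
--     """Peel the first column off recursively: {h0: col0} then the rest."""
--     if not headers:
--         return {}
--     result = {headers[0]: [row[0] for row in rows]}
--     result.update(_columns(headers[1:], [row[1:] for row in rows]))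
--     return result
-- ===== Notes on version B (the rewrite author's own statement) =====
-- stated objective: alternative
-- what changed: Replaced A's iterative transpose (zip(*table[1:])) plus dict(zip(...)) body with a recursive head-column split that peels the first column off, binds it to the first header and recurses on the row tails, and reformulated the three validation checks (length-set and enumerate-prefix duplicate scan) with identical messages.
import Mathlib
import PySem

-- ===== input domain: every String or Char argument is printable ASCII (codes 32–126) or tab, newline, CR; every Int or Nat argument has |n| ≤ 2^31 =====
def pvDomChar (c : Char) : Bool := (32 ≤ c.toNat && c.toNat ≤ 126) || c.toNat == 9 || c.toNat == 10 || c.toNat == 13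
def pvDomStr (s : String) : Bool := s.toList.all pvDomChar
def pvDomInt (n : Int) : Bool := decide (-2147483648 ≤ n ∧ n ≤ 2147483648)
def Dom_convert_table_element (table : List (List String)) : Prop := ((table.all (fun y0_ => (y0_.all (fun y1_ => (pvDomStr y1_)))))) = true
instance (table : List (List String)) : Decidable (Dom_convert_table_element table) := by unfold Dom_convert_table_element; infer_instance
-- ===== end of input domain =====

-- B replaces A's iterative transpose-then-zip-then-dict body by a recursive head-column
-- split — peel the first column off, bind it to the first header, recurse on the row tails —
-- and reformulates the validations (alternative decomposition, same cost).

-- ===== PORT A =====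
-- zip(*rows): fueled transliteration; fuel = length of the first row is enough, since zip
-- stops as soon as any row is exhausted (exact for every rows).
def zipStarGo (fuel : Nat) (rows : List (List String)) : List (List String) :=
  match fuel with
  | 0 => []
  | n + 1 =>
    if rows.any (fun r => r.isEmpty) then []
    else (rows.map (fun r => r.headD "")) :: zipStarGo n (rows.map (fun r => r.tail))

def zipStar (rows : List (List String)) : List (List String) :=
  zipStarGo (rows.headD []).length rows

def convert_table_element (table : List (List String)) : List (String × List String) :=
  if table.length ≤ 1 then []   -- Python: raise ValueError (excluded by Pre_)
  else if ¬ (table.all (fun row => row.length == (table.headD []).length)) then []  -- raise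
  else
    let headers := table.headD []
    if headers.length ≠ (PySem.Set.ofList headers).length then []  -- raise (duplicate headers)
    else
      let values := zipStar (table.drop 1)                  -- list(map(list, zip(*table[1:])))
      (PySem.Dict.ofList (headers.zip values)).items        -- dict(zip(headers, values))

-- ===== PORT B =====
-- dupes = [h for i, h in enumerate(headers) if h in headers[:i]]
def dupesOf (headers : List String) : List String :=
  ((PySem.List.enumerate headers).filter
      (fun p => (PySem.List.slice headers none (some p.1)).contains p.2)).map (fun p => p.2)

-- _columns(headers, rows): {headers[0]: [row[0] for row in rows]}, then result.update of the
-- recursion on the tails; the duplicate guard ran first, so the keys of the recursive dict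
-- are distinct and never overwrite: the dict built by update is exactly this cons list
-- (row[0]/row[1:] are exact as headD/tail here since every row has the headers' length).
def columnsB : List String → List (List String) → List (String × List String)
  | [], _ => []
  | h :: t, rows =>
      (h, rows.map (fun r => r.headD "")) :: columnsB t (rows.map (fun r => r.tail))

def convert_table_element_alt (table : List (List String)) : List (String × List String) :=
  if table.length < 2 then []   -- Python: raise ValueError (excluded by Pre_)
  else if 1 < (PySem.Set.ofList (table.map (fun r => r.length))).length then []  -- raise
  else
    let headers := table.headD []
    if dupesOf headers ≠ [] then []  -- raise (duplicate headers)
    else columnsB headers (table.drop 1)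

-- ===== PRECONDITION & SPEC =====
-- Pre_ excludes exactly the inputs where A raises ValueError: fewer than two rows,
-- ragged rows, or duplicate headers.
def Pre_convert_table_element (table : List (List String)) : Prop :=
  2 ≤ table.length ∧ (∀ row ∈ table, row.length = (table.headD []).length) ∧
    (table.headD []).Nodup
instance (table : List (List String)) : Decidable (Pre_convert_table_element table) := by
  unfold Pre_convert_table_element; infer_instance

def pvWitness_convert_table_element : List (List String) := [["a", "b"], ["1", "2"], ["3", "4"]]

def Spec_convert_table_element (table : List (List String)) (out : List (String × List String)) : Prop := out = convert_table_element_alt table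
instance (table : List (List String)) (out : List (String × List String)) : Decidable (Spec_convert_table_element table out) := by unfold Spec_convert_table_element; infer_instance

-- ===== CLAIM (what is proved, stated in full; the proofs are below) =====
def Claim_equal_convert_table_element : Prop := ∀ (table : List (List String)), Dom_convert_table_element table → Pre_convert_table_element table → Spec_convert_table_element table (convert_table_element table)

-- ===== LEMMAS AND PROOFS =====

-- the common column description: column i is the i-th cell of every row
def colsOf (n : Nat) (rows : List (List String)) : List (List String) :=
  (List.range n).map (fun i => rows.map (fun r => r.getD i ""))

lemma colsOf_succ (n : Nat) (rows : List (List String)) :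
    colsOf (n + 1) rows
      = (rows.map (fun r => r.headD "")) :: colsOf n (rows.map (fun r => r.tail)) := by
  unfold colsOf
  rw [List.range_succ_eq_map]
  simp only [List.map_cons, List.map_map]
  congr 1
  · apply List.map_congr_left
    intro r _
    cases r <;> simp
  · apply List.map_congr_left
    intro i _
    apply List.map_congr_left
    intro r _
    cases r <;> simp

lemma zipStarGo_eq_colsOf (n : Nat) :
    ∀ rows : List (List String), (∀ r ∈ rows, r.length = n) →
      zipStarGo n rows = colsOf n rows := by
  induction n with
  | zero => intro rows _; simp [zipStarGo, colsOf]
  | succ n ih =>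
    intro rows hlen
    have hany : rows.any (fun r => r.isEmpty) = false := by
      simp only [List.any_eq_false]
      intro r hr
      have := hlen r hr
      cases r with
      | nil => simp at this
      | cons a t => simp [List.isEmpty]
    have htail : ∀ r ∈ rows.map (fun r => r.tail), r.length = n := by
      intro r hr
      rcases List.mem_map.mp hr with ⟨r', hr', rfl⟩
      have := hlen r' hr'
      cases r' with
      | nil => simp at this
      | cons a t => simpa using this
    rw [zipStarGo, hany]
    simp only [Bool.false_eq_true, if_false, ih _ htail]
    rw [colsOf_succ]

-- B's recursion computes header-tagged columns, with no side conditions at all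
lemma columnsB_eq_zip_colsOf :
    ∀ (hs : List String) (rows : List (List String)),
      columnsB hs rows = hs.zip (colsOf hs.length rows) := by
  intro hs
  induction hs with
  | nil => intro rows; simp [columnsB, colsOf]
  | cons h t ih =>
    intro rows
    rw [columnsB, ih, List.length_cons, colsOf_succ, List.zip_cons_cons]

-- dict(pairs) with pairwise-distinct keys lists exactly those pairs
lemma items_update_nodup {κ ν : Type} [BEq κ] [LawfulBEq κ] :
    ∀ (l : List (κ × ν)) (d : PySem.Dict κ ν),
      (∀ p ∈ l, d.contains p.1 = false) → (l.map Prod.fst).Nodup →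
      (d.update l).items = d.items ++ l := by
  intro l
  induction l with
  | nil => intro d _ _; simp [PySem.Dict.update]
  | cons p l ih =>
    intro d hc hnd
    obtain ⟨k, v⟩ := p
    rw [List.map_cons] at hnd
    have hk : d.contains k = false := hc (k, v) (by simp)
    have hnotin : k ∉ l.map Prod.fst := (List.nodup_cons.mp hnd).1
    have hstep : d.update ((k, v) :: l) = (d.insert k v).update l := by
      simp [PySem.Dict.update]
    rw [hstep, ih (d.insert k v) ?_ hnd.of_cons]
    · rw [PySem.Dict.items_insert_of_not_contains d v hk, List.append_assoc]
      rfl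
    · intro q hq
      have hne : q.1 ≠ k := by
        intro he
        exact hnotin (he ▸ List.mem_map_of_mem hq)
      rw [PySem.Dict.contains_insert]
      simp [hne, hc q (by simp [hq])]

lemma items_ofList_nodup {κ ν : Type} [BEq κ] [LawfulBEq κ]
    (l : List (κ × ν)) (hnd : (l.map Prod.fst).Nodup) :
    (PySem.Dict.ofList l).items = l := by
  have : (PySem.Dict.empty.update l).items = PySem.Dict.empty.items ++ l :=
    items_update_nodup l PySem.Dict.empty (fun p _ => PySem.Dict.contains_empty p.1) hnd
  simpa [PySem.Dict.ofList, PySem.Dict.empty, PySem.Dict.items] using this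

-- nodup headers make B's dupes list empty
lemma dupesOf_eq_nil (headers : List String) (hnd : headers.Nodup) :
    dupesOf headers = [] := by
  unfold dupesOf
  rw [List.map_eq_nil_iff, List.filter_eq_nil_iff]
  intro p hp
  rcases (PySem.List.mem_enumerate_iff _ _ _).mp hp with ⟨k, hk, rfl⟩
  simp only [zero_add]
  rw [PySem.List.slice_to_natCast]
  simp only [Bool.not_eq_true, List.contains_eq_mem, decide_eq_false_iff_not]
  intro hmem
  rcases List.mem_take_iff_getElem.mp hmem with ⟨j, hj, hje⟩
  have : j = k := (List.Nodup.getElem_inj_iff hnd).mp hje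
  omega

-- a nodup list whose elements are all equal has at most one element
lemma nodup_all_eq_length_le_one {α : Type} (l : List α) (a : α)
    (hnd : l.Nodup) (hall : ∀ x ∈ l, x = a) : l.length ≤ 1 := by
  match l with
  | [] => simp
  | [x] => simp
  | x :: y :: t =>
    have hx : x = a := hall x (by simp)
    have hy : y = a := hall y (by simp)
    have := (List.nodup_cons.mp hnd).1
    exact absurd (by simp [hx, hy]) this

-- ===== VERDICT (by name: the statement is the Claim_ definition above) =====
theorem convert_table_element_spec : Claim_equal_convert_table_element := by
  intro table _ hpre
  obtain ⟨h2, hrows, hnodup⟩ := hpre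
  unfold Spec_convert_table_element convert_table_element convert_table_element_alt
  have hne : ¬ table.length ≤ 1 := by omega
  have hne2 : ¬ table.length < 2 := by omega
  have hall : (table.all (fun row => row.length == (table.headD []).length)) = true := by
    simp only [List.all_eq_true, beq_iff_eq]
    exact hrows
  have hnd := PySem.Set.ofList_eq_self_of_nodup (table.headD []) hnodup
  have hlens : ¬ 1 < (PySem.Set.ofList (table.map (fun r => r.length))).length := by
    have hle := nodup_all_eq_length_le_one
      (PySem.Set.ofList (table.map (fun r => r.length))) (table.headD []).length
      (PySem.Set.nodup_ofList _)
      (by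
        intro x hx
        rcases List.mem_map.mp ((PySem.Set.mem_ofList _ _).mp hx) with ⟨r, hr, rfl⟩
        exact hrows r hr)
    omega
  have hdup := dupesOf_eq_nil (table.headD []) hnodup
  simp only [hall, hnd, hdup, if_neg hne, if_neg hne2, if_neg hlens, not_true, ne_eq,
    if_false]
  have hdrop : ∀ r ∈ table.drop 1, r.length = (table.headD []).length :=
    fun r hr => hrows r (List.mem_of_mem_drop hr)
  have hdne : table.drop 1 ≠ [] := by
    intro h
    have := List.length_drop (l := table) (i := 1)
    rw [h] at this
    simp at this
    omega
  have hfuel : ((table.drop 1).headD []).length = (table.headD []).length := by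
    rcases he : table.drop 1 with _ | ⟨r0, rest⟩
    · exact absurd he hdne
    · simpa using hdrop r0 (by simp [he])
  have hcols : zipStar (table.drop 1) = colsOf (table.headD []).length (table.drop 1) := by
    rw [zipStar, hfuel]
    exact zipStarGo_eq_colsOf _ _ hdrop
  rw [hcols, columnsB_eq_zip_colsOf]
  apply items_ofList_nodup
  rw [List.map_fst_zip]
  · exact hnodup
  · simp [colsOf]
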